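-- pv_equiv track=rewrite | github.com/UVCHIKORITA/BIOprep | assortedquestions/climbing_the_ladder.py | generate_ranks
-- ===== SOURCE A (Python) =====
-- def generate_ranks(arr):
--     rankCount = 0
--     ranks = []
--     i = 0
--     while i < len(arr):
--         if arr[i-1] != arr[i] or i == 0:
--             rankCount += 1
--         ranks.append(rankCount)
--         i += 1
--     return ranks
-- ===== SOURCE B (Python) =====
-- def generate_ranks(arr):
--     # run-based: find each maximal run of equal values, emit its rank run-length times
--     ranks = []
--     rank = 0
--     n = len(arr)
--     i = 0
--     while i < n:
--         j = i + 1
--         while j < n and arr[j] == arr[i]: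
--             j += 1
--         rank += 1
--         ranks.extend([rank] * (j - i))
--         i = j
--     return ranks
-- ===== Notes on version B (the rewrite author's own statement) =====
-- stated objective: alternative
-- what changed: Replaces the per-index loop that compares arr[i-1] with arr[i] (using Python's negative-index wraparound at i=0 plus an 'or i == 0' guard) by a run-based scan: an inner loop finds each maximal run of equal values and the run's rank is emitted run-length times with list.extend.
import Mathlib
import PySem

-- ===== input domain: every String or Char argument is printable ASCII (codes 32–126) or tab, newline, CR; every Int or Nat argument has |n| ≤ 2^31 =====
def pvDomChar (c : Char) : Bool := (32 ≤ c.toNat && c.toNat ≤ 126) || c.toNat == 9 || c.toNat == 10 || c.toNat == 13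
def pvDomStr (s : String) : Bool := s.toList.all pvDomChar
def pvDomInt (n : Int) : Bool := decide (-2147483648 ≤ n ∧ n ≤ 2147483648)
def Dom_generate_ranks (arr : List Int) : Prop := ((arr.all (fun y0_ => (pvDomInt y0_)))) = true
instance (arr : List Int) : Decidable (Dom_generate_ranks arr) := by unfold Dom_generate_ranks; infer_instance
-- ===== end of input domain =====

-- B is an alternative run-based scan (inner loop over each maximal run of equal values); same O(n) cost, no speed claim.

-- ===== PORT A =====
-- while loop with index i, fuel = arr.length (the loop runs exactly arr.length times)
def pvLoopA (arr : List Int) : Nat → Int → Int → List Int → List Int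
  | 0, _, _, ranks => ranks
  | fuel + 1, i, rankCount, ranks =>
    if i < (arr.length : Int) then
      let rankCount' :=
        if PySem.List.pyGet? arr (i - 1) ≠ PySem.List.pyGet? arr i ∨ i = 0 then rankCount + 1
        else rankCount
      pvLoopA arr fuel (i + 1) rankCount' (ranks ++ [rankCount'])
    else ranks

def generate_ranks (arr : List Int) : List Int :=
  pvLoopA arr arr.length 0 0 []

-- ===== PORT B =====
-- inner while of Source B: advance j while arr[j] == x
def pvRunEnd (arr : List Int) (x : Int) (j : Nat) : Nat :=
  if h : j < arr.length then
    if arr[j] = x then pvRunEnd arr x (j + 1) else j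
  else j
termination_by arr.length - j

lemma le_pvRunEnd (arr : List Int) (x : Int) (j : Nat) : j ≤ pvRunEnd arr x j := by
  fun_induction pvRunEnd arr x j <;> omega

-- outer while of Source B
def pvGoB (arr : List Int) (rank : Int) (i : Nat) (ranks : List Int) : List Int :=
  if h : i < arr.length then
    let j := pvRunEnd arr arr[i] (i + 1)
    pvGoB arr (rank + 1) j (ranks ++ List.replicate (j - i) (rank + 1))
  else ranks
termination_by arr.length - i
decreasing_by
  have := le_pvRunEnd arr arr[i] (i + 1)
  omega

def generate_ranks_alt (arr : List Int) : List Int :=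
  pvGoB arr 0 0 []

-- ===== PRECONDITION & SPEC =====
def Spec_generate_ranks (arr : List Int) (out : List Int) : Prop := out = generate_ranks_alt arr
instance (arr : List Int) (out : List Int) : Decidable (Spec_generate_ranks arr out) := by unfold Spec_generate_ranks; infer_instance

-- ===== CLAIM (what is proved, stated in full; the proofs are below) =====
def Claim_equal_generate_ranks : Prop := ∀ (arr : List Int), Dom_generate_ranks arr → Spec_generate_ranks arr (generate_ranks arr)

-- ===== LEMMAS AND PROOFS =====

-- canonical form both ports are reduced to: structural recursion carrying the previous value
def pvCanon : List Int → Option Int → Int → List Int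
  | [], _, _ => []
  | x :: xs, prev, rc =>
    let rc' := if prev = some x then rc else rc + 1
    rc' :: pvCanon xs (some x) rc'

-- the "previous element" seen by A at index i
def pvPrevAt (arr : List Int) (i : Nat) : Option Int :=
  if i = 0 then none else PySem.List.pyGet? arr ((i : Int) - 1)

lemma pvLoopA_canon (arr : List Int) :
    ∀ (n i : Nat) (rc : Int) (ranks : List Int),
      n = arr.length - i → i ≤ arr.length →
      pvLoopA arr n (i : Int) rc ranks = ranks ++ pvCanon (arr.drop i) (pvPrevAt arr i) rc := by
  intro n
  induction n with
  | zero =>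
    intro i rc ranks hn hi
    have : i = arr.length := by omega
    subst this
    simp [pvLoopA, pvCanon]
  | succ n ih =>
    intro i rc ranks hn hi
    have hilt : i < arr.length := by omega
    have hdrop : arr.drop i = arr[i] :: arr.drop (i + 1) := List.drop_eq_getElem_cons hilt
    have hget : PySem.List.pyGet? arr (i : Int) = some arr[i] := by
      simp [PySem.List.pyGet?_natCast, List.getElem?_eq_getElem hilt]
    have hcond : (PySem.List.pyGet? arr ((i : Int) - 1) ≠ PySem.List.pyGet? arr (i : Int) ∨ (i : Int) = 0)
        ↔ ¬ (pvPrevAt arr i = some arr[i]) := by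
      by_cases h0 : i = 0
      · subst h0; simp [pvPrevAt]
      · have h1 : ((i : Int) - 1) = ((i - 1 : Nat) : Int) := by push_cast [Nat.cast_sub (by omega : 1 ≤ i)]; ring
        have hm1 : i - 1 < arr.length := by omega
        simp [pvPrevAt, h0, h1, hget, List.getElem?_eq_getElem hm1]
    have hprev : pvPrevAt arr (i + 1) = some arr[i] := by
      simp [pvPrevAt, hget]
    have hstep : ((i : Int) + 1) = (((i + 1 : Nat)) : Int) := by push_cast; ring
    rw [pvLoopA, if_pos (by exact_mod_cast hilt)]
    rw [hdrop]
    simp only [pvCanon]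
    by_cases hq : pvPrevAt arr i = some arr[i]
    · rw [if_neg (by rw [hcond]; simp [hq]), if_pos hq, hstep,
        ih (i + 1) rc (ranks ++ [rc]) (by omega) (by omega), hprev]
      simp
    · rw [if_pos (hcond.mpr hq), if_neg hq, hstep,
        ih (i + 1) (rc + 1) (ranks ++ [rc + 1]) (by omega) (by omega), hprev]
      simp

lemma pvCanon_rep_same (x : Int) :
    ∀ (m : Nat) (xs : List Int) (r : Int),
      pvCanon (List.replicate m x ++ xs) (some x) r
        = List.replicate m r ++ pvCanon xs (some x) r := by
  intro m
  induction m with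
  | zero => intro xs r; simp
  | succ m ih => intro xs r; simp [List.replicate_succ, pvCanon, ih]

lemma pvRunEnd_spec (arr : List Int) (x : Int) :
    ∀ (n j : Nat), arr.length - j ≤ n → j ≤ arr.length →
      pvRunEnd arr x j ≤ arr.length ∧
      arr.drop j = List.replicate (pvRunEnd arr x j - j) x ++ arr.drop (pvRunEnd arr x j) ∧
      (∀ h : pvRunEnd arr x j < arr.length, arr[pvRunEnd arr x j] ≠ x) := by
  intro n
  induction n with
  | zero =>
    intro j hn hj
    have : j = arr.length := by omega
    rw [pvRunEnd, dif_neg (by omega)]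
    refine ⟨by omega, by simp, fun h => absurd h (by omega)⟩
  | succ n ih =>
    intro j hn hj
    by_cases hlt : j < arr.length
    · rw [pvRunEnd, dif_pos hlt]
      by_cases heq : arr[j] = x
      · rw [if_pos heq]
        obtain ⟨h1, h2, h3⟩ := ih (j + 1) (by omega) (by omega)
        have hge : j + 1 ≤ pvRunEnd arr x (j + 1) := le_pvRunEnd arr x (j + 1)
        refine ⟨h1, ?_, h3⟩
        rw [List.drop_eq_getElem_cons hlt, heq, h2,
          show pvRunEnd arr x (j + 1) - j = (pvRunEnd arr x (j + 1) - (j + 1)) + 1 by omega,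
          List.replicate_succ]
        simp
      · rw [if_neg heq]
        exact ⟨by omega, by simp, fun _ => heq⟩
    · rw [pvRunEnd, dif_neg hlt]
      refine ⟨by omega, by simp, fun h => absurd h hlt⟩

lemma pvGoB_canon (arr : List Int) :
    ∀ (n i : Nat) (rank : Int) (ranks : List Int) (prev : Option Int),
      arr.length - i ≤ n → i ≤ arr.length →
      (∀ h : i < arr.length, prev ≠ some arr[i]) →
      pvGoB arr rank i ranks = ranks ++ pvCanon (arr.drop i) prev rank := by
  intro n
  induction n with
  | zero =>
    intro i rank ranks prev hn hi _
    have : i = arr.length := by omega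
    subst this
    rw [pvGoB, dif_neg (by omega)]
    simp [pvCanon]
  | succ n ih =>
    intro i rank ranks prev hn hi hprev
    by_cases hlt : i < arr.length
    · rw [pvGoB, dif_pos hlt]
      obtain ⟨h1, h2, h3⟩ := pvRunEnd_spec arr arr[i] n (i + 1) (by omega) (by omega)
      have hge : i + 1 ≤ pvRunEnd arr arr[i] (i + 1) := le_pvRunEnd arr arr[i] (i + 1)
      set j := pvRunEnd arr arr[i] (i + 1) with hj
      have hdrop : arr.drop i = List.replicate (j - i) arr[i] ++ arr.drop j := by
        rw [List.drop_eq_getElem_cons hlt, h2,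
          show j - i = (j - (i + 1)) + 1 by omega, List.replicate_succ]
        simp
      have hcanon : pvCanon (arr.drop i) prev rank
          = List.replicate (j - i) (rank + 1) ++ pvCanon (arr.drop j) (some arr[i]) (rank + 1) := by
        rw [hdrop, show j - i = (j - (i + 1)) + 1 by omega, List.replicate_succ, List.cons_append]
        simp only [pvCanon]
        rw [if_neg (hprev hlt), pvCanon_rep_same, List.replicate_succ, List.cons_append]
      rw [ih j (rank + 1) (ranks ++ List.replicate (j - i) (rank + 1)) (some arr[i])
            (by omega) (by omega) (fun h => by simpa using (h3 h).symm),
        hcanon]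
      simp
    · rw [pvGoB, dif_neg hlt]
      have : i = arr.length := by omega
      subst this
      simp [pvCanon]

-- ===== VERDICT (by name: the statement is the Claim_ definition above) =====
theorem generate_ranks_spec : Claim_equal_generate_ranks := by
  intro arr _
  unfold Spec_generate_ranks generate_ranks generate_ranks_alt
  have hA := pvLoopA_canon arr arr.length 0 0 [] (by omega) (by omega)
  have hB := pvGoB_canon arr arr.length 0 0 [] none (by omega) (by omega)
    (fun h => by simp)
  simp only [Nat.cast_zero] at hA
  rw [hA, hB]
  rfl
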